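-- pv_equiv track=rewrite | github.com/akkocah/aws-devops-workshop | python/coding-challenges/cc-013-compass/compass.py | final_direction
-- ===== SOURCE A (Python) =====
-- def final_direction(i, t):
-- 	l = {"N": "W", "W": "S", "S": "E", "E":"N"}
-- 	r = {"N": "E", "E": "S", "S": "W", "W":"N"}
-- 	for j in t:
-- 		if j == "L":
-- 			i = l[i]
-- 		else:
-- 			i = r[i]
-- 	return i
-- ===== SOURCE B (Python) =====
-- def final_direction(i, t):
--     # Closed-form: count net right turns and index into the cycle N,E,S,W.
--     if not t:
--         return i
--     dirs = ["N", "E", "S", "W"]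
--     net = sum(-1 if ch == "L" else 1 for ch in t)
--     return dirs[(dirs.index(i) + net) % 4]
-- ===== Notes on version B (the rewrite author's own statement) =====
-- stated objective: simpler
-- what changed: Replaces the per-step dict-chasing loop with a closed-form computation: sum the net turn offset (-1 for 'L', +1 otherwise) and index into the cyclic list ['N','E','S','W'] modulo 4.
import Mathlib
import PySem

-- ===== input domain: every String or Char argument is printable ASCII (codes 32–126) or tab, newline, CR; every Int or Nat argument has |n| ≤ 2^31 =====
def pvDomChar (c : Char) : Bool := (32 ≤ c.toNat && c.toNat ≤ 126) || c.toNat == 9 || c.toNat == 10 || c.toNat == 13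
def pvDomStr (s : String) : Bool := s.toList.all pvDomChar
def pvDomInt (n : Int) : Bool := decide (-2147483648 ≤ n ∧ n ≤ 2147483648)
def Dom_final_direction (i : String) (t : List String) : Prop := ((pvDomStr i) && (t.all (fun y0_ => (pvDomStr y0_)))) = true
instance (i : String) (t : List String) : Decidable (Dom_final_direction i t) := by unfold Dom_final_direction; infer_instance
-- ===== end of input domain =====

-- B replaces A's per-step dict-chasing loop by a closed form: net turn offset summed once,
-- then one modular index into the cycle ["N","E","S","W"]; same cost, simpler ("simpler").

-- ===== PORT A =====
-- the two literal dicts of A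
def fdL : PySem.Dict String String := PySem.Dict.ofList [("N","W"),("W","S"),("S","E"),("E","N")]
def fdR : PySem.Dict String String := PySem.Dict.ofList [("N","E"),("E","S"),("S","W"),("W","N")]

-- one loop iteration of A: dict lookup, none = KeyError (excluded by Pre_)
def fdStep (st : Option String) (j : String) : Option String :=
  st.bind fun i => if j == "L" then fdL.get? i else fdR.get? i

def final_direction (i : String) (t : List String) : String :=
  match t.foldl fdStep (some i) with
  | some s => s
  | none => ""   -- KeyError in Python; unreachable under Pre_

-- ===== PORT B =====
def fdDirs : List String := ["N", "E", "S", "W"]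

-- net = sum(-1 if ch == "L" else 1 for ch in t)
def fdNet (t : List String) : Int :=
  t.foldl (fun a ch => a + (if ch == "L" then (-1 : Int) else 1)) 0

def final_direction_alt (i : String) (t : List String) : String :=
  if t.isEmpty then i
  else
    match PySem.List.index? fdDirs i with
    | some k =>
      match PySem.List.pyGet? fdDirs (PySem.Int.mod ((k : Int) + fdNet t) 4) with
      | some s => s
      | none => ""   -- unreachable: 0 ≤ mod _ 4 < 4
    | none => ""     -- ValueError in Python; unreachable under Pre_

-- ===== PRECONDITION & SPEC =====
-- Pre_ excludes exactly the inputs where A raises KeyError: an invalid start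
-- direction together with a nonempty turn list (B raises ValueError there).
def Pre_final_direction (i : String) (t : List String) : Prop :=
  t = [] ∨ i ∈ (["N", "E", "S", "W"] : List String)
instance (i : String) (t : List String) : Decidable (Pre_final_direction i t) := by
  unfold Pre_final_direction; infer_instance

def pvWitness_final_direction : String × List String := ("N", ["L", "R", "X"])

def Spec_final_direction (i : String) (t : List String) (out : String) : Prop := out = final_direction_alt i t
instance (i : String) (t : List String) (out : String) : Decidable (Spec_final_direction i t out) := by unfold Spec_final_direction; infer_instance

-- ===== CLAIM (what is proved, stated in full; the proofs are below) =====
def Claim_equal_final_direction : Prop := ∀ (i : String) (t : List String), Dom_final_direction i t → Pre_final_direction i t → Spec_final_direction i t (final_direction i t)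

-- ===== LEMMAS AND PROOFS =====

lemma fdNet_cons (j : String) (t : List String) :
    fdNet (j :: t) = (if j == "L" then (-1 : Int) else 1) + fdNet t := by
  unfold fdNet
  simp only [List.foldl_cons]
  rw [PySem.List.foldl_add (g := fun ch => if ch == "L" then (-1 : Int) else 1),
      PySem.List.foldl_add (g := fun ch => if ch == "L" then (-1 : Int) else 1)]
  ring

-- invariant of A's loop: starting from direction number k, the loop lands on
-- direction number (k + net t) mod 4
lemma fd_loop_eq (t : List String) : ∀ k : Int, (k = 0 ∨ k = 1 ∨ k = 2 ∨ k = 3) →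
    t.foldl fdStep (PySem.List.pyGet? fdDirs k) =
      PySem.List.pyGet? fdDirs (PySem.Int.mod (k + fdNet t) 4) := by
  induction t with
  | nil =>
    intro k hk
    have : fdNet [] = 0 := rfl
    rcases hk with h | h | h | h <;> subst h <;> decide
  | cons j t ih =>
    intro k hk
    have hmod : ∀ a b : Int, a % 4 = b % 4 →
        PySem.Int.mod a 4 = PySem.Int.mod b 4 := by
      intro a b h
      rw [PySem.Int.mod_eq_emod_of_pos (by norm_num : (0:Int) < 4),
          PySem.Int.mod_eq_emod_of_pos (by norm_num : (0:Int) < 4), h]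
    have key : ∀ (k' : Int), (k' = 0 ∨ k' = 1 ∨ k' = 2 ∨ k' = 3) →
        (k' % 4 = (k + (if j == "L" then (-1 : Int) else 1)) % 4) →
        fdStep (PySem.List.pyGet? fdDirs k) j = PySem.List.pyGet? fdDirs k' →
        (j :: t).foldl fdStep (PySem.List.pyGet? fdDirs k) =
          PySem.List.pyGet? fdDirs (PySem.Int.mod (k + fdNet (j :: t)) 4) := by
      intro k' hk' hmod' hstep
      rw [List.foldl_cons, hstep, ih k' hk', fdNet_cons]
      exact congrArg (PySem.List.pyGet? fdDirs) (hmod _ _ (by omega))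
    by_cases hj : j == "L"
    · rcases hk with h | h | h | h <;> subst h
      · exact key 3 (by omega) (by simp [hj]) (by simp [fdStep, fdL, hj]; decide)
      · exact key 0 (by omega) (by simp [hj]) (by simp [fdStep, fdL, hj]; decide)
      · exact key 1 (by omega) (by simp [hj]) (by simp [fdStep, fdL, hj]; decide)
      · exact key 2 (by omega) (by simp [hj]) (by simp [fdStep, fdL, hj]; decide)
    · rcases hk with h | h | h | h <;> subst h
      · exact key 1 (by omega) (by simp [hj]) (by simp [fdStep, fdR, hj]; decide)
      · exact key 2 (by omega) (by simp [hj]) (by simp [fdStep, fdR, hj]; decide)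
      · exact key 3 (by omega) (by simp [hj]) (by simp [fdStep, fdR, hj]; decide)
      · exact key 0 (by omega) (by simp [hj]) (by simp [fdStep, fdR, hj]; decide)

-- ===== VERDICT (by name: the statement is the Claim_ definition above) =====
theorem final_direction_spec : Claim_equal_final_direction := by
  intro i t _ hpre
  unfold Spec_final_direction
  cases t with
  | nil => rfl
  | cons j rest =>
    have hi : i ∈ (["N", "E", "S", "W"] : List String) := by
      rcases hpre with h | h
      · exact absurd h (by simp)
      · exact h
    have main : ∀ k : Int, (k = 0 ∨ k = 1 ∨ k = 2 ∨ k = 3) →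
        (some i = PySem.List.pyGet? fdDirs k) →
        (PySem.List.index? fdDirs i = some k.toNat) →
        final_direction i (j :: rest) = final_direction_alt i (j :: rest) := by
      intro k hk hget hidx
      unfold final_direction final_direction_alt
      rw [hget, fd_loop_eq (j :: rest) k hk, hidx]
      have hcast : ((k.toNat : Int)) = k := by omega
      simp [hcast]
    fin_cases hi
    · exact main 0 (by omega) (by decide) (by decide)
    · exact main 1 (by omega) (by decide) (by decide)
    · exact main 2 (by omega) (by decide) (by decide)
    · exact main 3 (by omega) (by decide) (by decide)
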